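-- pv_equiv track=rewrite | github.com/AIIncubator25/aecoa | agents/parsers/agent1_unified_processor.py | _process_irregular_csv_text
-- ===== SOURCE A (Python) =====
-- def _process_irregular_csv_text(text_content: str) -> str:
--     """Process irregular CSV content as plain text with structure analysis."""
--     lines = text_content.strip().split('\n')
--     text_parts = ["=== IRREGULAR CSV DOCUMENT CONTENT ===\n"]
--
--     text_parts.append(f"Total lines: {len(lines)}\n")
--     text_parts.append("=== RAW CONTENT ===")
--
--     # Process each line and identify structure
--     table_sections = []
--     current_table = []
--
--     for i, line in enumerate(lines, 1):
--         line = line.strip()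
--         if not line:
--             if current_table:
--                 table_sections.append(current_table)
--                 current_table = []
--             continue
--
--         # Check if line looks like a table header or data
--         comma_count = line.count(',')
--         if comma_count > 0 and any(char.isdigit() for char in line):
--             current_table.append((i, line, 'table_data'))
--         elif line.isupper() or 'TABLE' in line.upper():
--             if current_table:
--                 table_sections.append(current_table)
--                 current_table = []
--             text_parts.append(f"SECTION HEADER (Line {i}): {line}")
--         else:
--             text_parts.append(f"Line {i}: {line}")
--
--     # Add final table if exists
--     if current_table:
--         table_sections.append(current_table)
--
--     # Process identified tables
--     for idx, table in enumerate(table_sections):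
--         if len(table) > 1:  # Only process if multiple rows
--             text_parts.append(f"\n=== IDENTIFIED TABLE {idx + 1} ===")
--             for line_num, content, line_type in table:
--                 text_parts.append(f"Line {line_num}: {content}")
--
--     return "\n".join(text_parts)
-- ===== SOURCE B (Python) =====
-- def _process_irregular_csv_text(text_content: str) -> str:
--     """Two-pass re-implementation: classify each line first, then render."""
--     lines = text_content.strip().split('\n')
--
--     # Pass 1: classification records
--     records = []
--     for i, raw in enumerate(lines, 1):
--         s = raw.strip()
--         if not s:
--             records.append((0, '', 'blank'))
--         elif s.count(',') > 0 and any(c.isdigit() for c in s):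
--             records.append((i, s, 'table_data'))
--         elif s.isupper() or 'TABLE' in s.upper():
--             records.append((i, s, 'header'))
--         else:
--             records.append((i, s, 'plain'))
--
--     # Pass 2: render
--     parts = ["=== IRREGULAR CSV DOCUMENT CONTENT ===\n",
--              f"Total lines: {len(lines)}\n",
--              "=== RAW CONTENT ==="]
--     tables = []
--     run = []
--     for i, s, cat in records:
--         if cat == 'table_data':
--             run.append((i, s))
--         elif cat == 'blank':
--             if run:
--                 tables.append(run)
--                 run = []
--         elif cat == 'header':
--             if run:
--                 tables.append(run)
--                 run = []
--             parts.append(f"SECTION HEADER (Line {i}): {s}")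
--         else:
--             parts.append(f"Line {i}: {s}")
--     if run:
--         tables.append(run)
--
--     for idx, tbl in enumerate(tables):
--         if len(tbl) > 1:
--             parts.append(f"\n=== IDENTIFIED TABLE {idx + 1} ===")
--             for n, c in tbl:
--                 parts.append(f"Line {n}: {c}")
--
--     return "\n".join(parts)
-- ===== Notes on version B (the rewrite author's own statement) =====
-- stated objective: alternative
-- what changed: A's single fused loop (classify-and-render with in-loop table flushing) is split into two passes: a first pass builds an explicit per-line classification record list (blank/table_data/header/plain), and a second pass renders those records, with table runs kept as plain (line, content) pairs instead of tagged triples.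
import Mathlib
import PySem

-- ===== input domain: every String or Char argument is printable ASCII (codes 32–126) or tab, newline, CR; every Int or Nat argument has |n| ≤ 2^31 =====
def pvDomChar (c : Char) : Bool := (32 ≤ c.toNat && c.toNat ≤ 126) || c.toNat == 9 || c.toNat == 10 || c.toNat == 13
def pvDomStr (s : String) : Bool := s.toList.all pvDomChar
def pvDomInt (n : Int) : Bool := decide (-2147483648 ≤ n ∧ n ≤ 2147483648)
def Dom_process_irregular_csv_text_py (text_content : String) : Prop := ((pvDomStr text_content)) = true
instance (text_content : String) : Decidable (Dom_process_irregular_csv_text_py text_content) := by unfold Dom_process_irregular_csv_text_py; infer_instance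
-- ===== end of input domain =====

-- B re-decomposes A's single fused loop into two passes (classify every line first, then render);
-- objective: alternative decomposition, same complexity; return value only (no mutation involved).

-- s.isupper(): at least one cased character and no lowercase one — exact on the ASCII domain,
-- where the cased characters are exactly the letters (both Pythons call str.isupper).
def pvIsupper (cs : List Char) : Bool :=
  cs.any PySem.Chars.isalpha && cs.all (fun c => !PySem.Chars.islower c)

-- ===== PORT A =====
-- loop state: (text_parts, table_sections, current_table); table rows carry A's 'table_data' tag
def pvStepA (st : List (List Char) × List (List (Int × List Char × List Char)) × List (Int × List Char × List Char))
    (e : Int × List Char) :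
    List (List Char) × List (List (Int × List Char × List Char)) × List (Int × List Char × List Char) :=
  let line := PySem.Chars.strip e.2
  if line.isEmpty then
    (if !st.2.2.isEmpty then (st.1, st.2.1 ++ [st.2.2], []) else st)
  else if decide (0 < PySem.Chars.count line [',']) && line.any PySem.Chars.isdigit then
    (st.1, st.2.1, st.2.2 ++ [(e.1, line, "table_data".toList)])
  else if pvIsupper line || PySem.Chars.isIn "TABLE".toList (PySem.Chars.upper line) then
    (if !st.2.2.isEmpty then
      (st.1 ++ ["SECTION HEADER (Line ".toList ++ PySem.Int.toChars e.1 ++ "): ".toList ++ line], st.2.1 ++ [st.2.2], [])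
     else
      (st.1 ++ ["SECTION HEADER (Line ".toList ++ PySem.Int.toChars e.1 ++ "): ".toList ++ line], st.2.1, st.2.2))
  else
    (st.1 ++ ["Line ".toList ++ PySem.Int.toChars e.1 ++ ": ".toList ++ line], st.2.1, st.2.2)

-- 'for idx, table in enumerate(table_sections): …'
def pvEmitA (tables : List (List (Int × List Char × List Char))) (parts : List (List Char)) : List (List Char) :=
  (PySem.List.enumerate tables 0).foldl (fun ps p =>
    if 1 < p.2.length then
      p.2.foldl (fun ps r => ps ++ ["Line ".toList ++ PySem.Int.toChars r.1 ++ ": ".toList ++ r.2.1])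
        (ps ++ ["\n=== IDENTIFIED TABLE ".toList ++ PySem.Int.toChars (p.1 + 1) ++ " ===".toList])
    else ps) parts

def process_irregular_csv_text_py (text_content : String) : String :=
  let lines := PySem.Chars.splitOn (PySem.Chars.strip text_content.toList) ['\n']
  let parts0 := ["=== IRREGULAR CSV DOCUMENT CONTENT ===\n".toList,
                 "Total lines: ".toList ++ PySem.Int.toChars (lines.length : Int) ++ "\n".toList,
                 "=== RAW CONTENT ===".toList]
  let st := (PySem.List.enumerate lines 1).foldl pvStepA (parts0, [], [])
  let tables := if !st.2.2.isEmpty then st.2.1 ++ [st.2.2] else st.2.1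
  String.ofList (PySem.Chars.join ['\n'] (pvEmitA tables st.1))

-- ===== PORT B =====
inductive PvCat
  | blank | table | header | plain
deriving DecidableEq, Repr

-- pass 1: one classification record per line
def pvClassify (e : Int × List Char) : Int × List Char × PvCat :=
  let s := PySem.Chars.strip e.2
  if s.isEmpty then (0, [], PvCat.blank)
  else if decide (0 < PySem.Chars.count s [',']) && s.any PySem.Chars.isdigit then (e.1, s, PvCat.table)
  else if pvIsupper s || PySem.Chars.isIn "TABLE".toList (PySem.Chars.upper s) then (e.1, s, PvCat.header)
  else (e.1, s, PvCat.plain)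

-- pass 2: render one record; state (parts, tables, run), runs hold plain (line, content) pairs
def pvStepB (st : List (List Char) × List (List (Int × List Char)) × List (Int × List Char))
    (r : Int × List Char × PvCat) :
    List (List Char) × List (List (Int × List Char)) × List (Int × List Char) :=
  match r.2.2 with
  | PvCat.table => (st.1, st.2.1, st.2.2 ++ [(r.1, r.2.1)])
  | PvCat.blank => if !st.2.2.isEmpty then (st.1, st.2.1 ++ [st.2.2], []) else st
  | PvCat.header =>
      let st' := if !st.2.2.isEmpty then (st.1, st.2.1 ++ [st.2.2], ([] : List (Int × List Char))) else st
      (st'.1 ++ ["SECTION HEADER (Line ".toList ++ PySem.Int.toChars r.1 ++ "): ".toList ++ r.2.1], st'.2.1, st'.2.2)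
  | PvCat.plain => (st.1 ++ ["Line ".toList ++ PySem.Int.toChars r.1 ++ ": ".toList ++ r.2.1], st.2.1, st.2.2)

def pvEmitB (tables : List (List (Int × List Char))) (parts : List (List Char)) : List (List Char) :=
  (PySem.List.enumerate tables 0).foldl (fun ps p =>
    if 1 < p.2.length then
      p.2.foldl (fun ps r => ps ++ ["Line ".toList ++ PySem.Int.toChars r.1 ++ ": ".toList ++ r.2])
        (ps ++ ["\n=== IDENTIFIED TABLE ".toList ++ PySem.Int.toChars (p.1 + 1) ++ " ===".toList])
    else ps) parts

def process_irregular_csv_text_py_alt (text_content : String) : String :=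
  let lines := PySem.Chars.splitOn (PySem.Chars.strip text_content.toList) ['\n']
  let records := (PySem.List.enumerate lines 1).map pvClassify
  let parts0 := ["=== IRREGULAR CSV DOCUMENT CONTENT ===\n".toList,
                 "Total lines: ".toList ++ PySem.Int.toChars (lines.length : Int) ++ "\n".toList,
                 "=== RAW CONTENT ===".toList]
  let st := records.foldl pvStepB (parts0, [], [])
  let tables := if !st.2.2.isEmpty then st.2.1 ++ [st.2.2] else st.2.1
  String.ofList (PySem.Chars.join ['\n'] (pvEmitB tables st.1))

-- ===== PRECONDITION & SPEC =====
def Spec_process_irregular_csv_text_py (text_content : String) (out : String) : Prop := out = process_irregular_csv_text_py_alt text_content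
instance (text_content : String) (out : String) : Decidable (Spec_process_irregular_csv_text_py text_content out) := by unfold Spec_process_irregular_csv_text_py; infer_instance

-- ===== CLAIM (what is proved, stated in full; the proofs are below) =====
def Claim_equal_process_irregular_csv_text_py : Prop := ∀ (text_content : String), Dom_process_irregular_csv_text_py text_content → Spec_process_irregular_csv_text_py text_content (process_irregular_csv_text_py text_content)

-- ===== LEMMAS AND PROOFS =====
-- B's rows/state are A's with the constant 'table_data' tag dropped
def pvStripRow (r : Int × List Char × List Char) : Int × List Char := (r.1, r.2.1)

def pvStripSt (st : List (List Char) × List (List (Int × List Char × List Char)) × List (Int × List Char × List Char)) :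
    List (List Char) × List (List (Int × List Char)) × List (Int × List Char) :=
  (st.1, st.2.1.map (List.map pvStripRow), st.2.2.map pvStripRow)

theorem pvStepB_classify (st : List (List Char) × List (List (Int × List Char × List Char)) × List (Int × List Char × List Char))
    (e : Int × List Char) :
    pvStepB (pvStripSt st) (pvClassify e) = pvStripSt (pvStepA st e) := by
  obtain ⟨p, t, c⟩ := st
  cases c <;>
    simp only [pvStepA, pvClassify, pvStripSt] <;>
    split_ifs <;>
    simp_all [pvStepB, pvStripRow]

theorem pvEmitB_strip (tables : List (List (Int × List Char × List Char))) :
    ∀ (i : Int) (parts : List (List Char)),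
    (PySem.List.enumerate (tables.map (List.map pvStripRow)) i).foldl (fun ps p =>
      if 1 < p.2.length then
        p.2.foldl (fun ps r => ps ++ ["Line ".toList ++ PySem.Int.toChars r.1 ++ ": ".toList ++ r.2])
          (ps ++ ["\n=== IDENTIFIED TABLE ".toList ++ PySem.Int.toChars (p.1 + 1) ++ " ===".toList])
      else ps) parts
    = (PySem.List.enumerate tables i).foldl (fun ps p =>
      if 1 < p.2.length then
        p.2.foldl (fun ps r => ps ++ ["Line ".toList ++ PySem.Int.toChars r.1 ++ ": ".toList ++ r.2.1])
          (ps ++ ["\n=== IDENTIFIED TABLE ".toList ++ PySem.Int.toChars (p.1 + 1) ++ " ===".toList])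
      else ps) parts := by
  induction tables with
  | nil => intro i parts; rfl
  | cons tb tbs ih =>
      intro i parts
      simp only [List.map_cons, PySem.List.enumerate_cons, List.foldl_cons]
      rw [ih]
      congr 1
      simp only [List.length_map]
      split_ifs with h
      · rw [List.foldl_map]
        rfl
      · rfl

theorem pvFold_strip (l : List (Int × List Char))
    (st : List (List Char) × List (List (Int × List Char × List Char)) × List (Int × List Char × List Char)) :
    l.foldl (fun s e => pvStepB s (pvClassify e)) (pvStripSt st) = pvStripSt (l.foldl pvStepA st) := by
  induction l generalizing st with
  | nil => rfl
  | cons e l ih => simp only [List.foldl_cons, pvStepB_classify, ih]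

theorem pvFold_strip0 (l : List (Int × List Char)) (P : List (List Char)) :
    l.foldl (fun s e => pvStepB s (pvClassify e))
      (P, ([] : List (List (Int × List Char))), ([] : List (Int × List Char)))
    = pvStripSt (l.foldl pvStepA (P, [], [])) := by
  have h := pvFold_strip l (P, [], [])
  simpa [pvStripSt] using h

theorem pvTail (st : List (List Char) × List (List (Int × List Char × List Char)) × List (Int × List Char × List Char)) :
    pvEmitB (if !(pvStripSt st).2.2.isEmpty then (pvStripSt st).2.1 ++ [(pvStripSt st).2.2] else (pvStripSt st).2.1)
      (pvStripSt st).1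
    = pvEmitA (if !st.2.2.isEmpty then st.2.1 ++ [st.2.2] else st.2.1) st.1 := by
  obtain ⟨p, t, c⟩ := st
  cases c with
  | nil => simpa [pvStripSt, pvEmitA, pvEmitB] using pvEmitB_strip t 0 p
  | cons r rs =>
      simpa [pvStripSt, pvEmitA, pvEmitB, List.map_append] using pvEmitB_strip (t ++ [r :: rs]) 0 p

-- ===== VERDICT (by name: the statement is the Claim_ definition above) =====
theorem process_irregular_csv_text_py_spec : Claim_equal_process_irregular_csv_text_py := by
  intro tc _
  show process_irregular_csv_text_py tc = process_irregular_csv_text_py_alt tc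
  simp only [process_irregular_csv_text_py, process_irregular_csv_text_py_alt, List.foldl_map]
  rw [pvFold_strip0, pvTail]
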